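-- pv_equiv track=rewrite | github.com/tubtrb/autoreport | autoreport/web/manual_ai_yaml.py | _has_unbalanced_double_quote
-- ===== SOURCE A (Python) =====
-- def _has_unbalanced_double_quote(line: str) -> bool:
--     quote_count = 0
--     escaped = False
--     for char in line:
--         if escaped:
--             escaped = False
--             continue
--         if char == "\\":
--             escaped = True
--             continue
--         if char == '"':
--             quote_count += 1
--     return quote_count % 2 == 1
-- ===== SOURCE B (Python) =====
-- import re
--
-- def _has_unbalanced_double_quote(line: str) -> bool:
--     stripped = re.sub(r'\\.', '', line, flags=re.DOTALL)
--     return stripped.count('"') % 2 == 1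
-- ===== Notes on version B (the rewrite author's own statement) =====
-- stated objective: idiomatic
-- what changed: Replaced the per-character escape state machine with a regex substitution that deletes every backslash plus the character it escapes, followed by a parity count of the remaining double quotes.
import Mathlib
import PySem

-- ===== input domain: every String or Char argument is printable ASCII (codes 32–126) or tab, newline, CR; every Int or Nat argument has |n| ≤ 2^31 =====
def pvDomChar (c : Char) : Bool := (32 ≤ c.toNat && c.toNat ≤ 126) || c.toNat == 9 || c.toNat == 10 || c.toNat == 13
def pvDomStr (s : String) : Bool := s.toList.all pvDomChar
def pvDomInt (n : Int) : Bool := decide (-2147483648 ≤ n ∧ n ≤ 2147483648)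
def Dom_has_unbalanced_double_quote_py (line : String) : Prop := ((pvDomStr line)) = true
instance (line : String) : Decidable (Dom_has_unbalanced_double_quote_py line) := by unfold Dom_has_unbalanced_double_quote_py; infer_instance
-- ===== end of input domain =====

-- B replaces A's per-character escape state machine by first deleting every
-- backslash together with the character it escapes (re.sub(r'\\.', '', line, DOTALL)),
-- then taking the parity of the remaining '"' count (objective: idiomatic).

-- ===== PORT A =====
-- transliteration of A's loop: state = (quote_count, escaped)
def has_unbalanced_double_quote_py (line : String) : Bool :=
  let r := line.toList.foldl (fun (st : Int × Bool) (char : Char) =>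
    if st.2 then (st.1, false)
    else if char = '\\' then (st.1, true)
    else if char = '"' then (st.1 + 1, st.2)
    else st) (0, false)
  r.1 % 2 == 1

-- ===== PORT B =====
-- hand port of re.sub(r'\\.', '', line, flags=re.DOTALL): the regex engine scans
-- left to right and removes each backslash with the single character following it
-- (a trailing lone backslash has no match and is kept). Exact on all strings.
def pvStripEscaped : List Char → List Char
  | [] => []
  | '\\' :: _ :: rest => pvStripEscaped rest
  | c :: rest => c :: pvStripEscaped rest

def has_unbalanced_double_quote_py_alt (line : String) : Bool :=
  let stripped := pvStripEscaped line.toList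
  (stripped.count '"') % 2 == 1

-- ===== PRECONDITION & SPEC =====
def Spec_has_unbalanced_double_quote_py (line : String) (out : Bool) : Prop := out = has_unbalanced_double_quote_py_alt line
instance (line : String) (out : Bool) : Decidable (Spec_has_unbalanced_double_quote_py line out) := by unfold Spec_has_unbalanced_double_quote_py; infer_instance

-- ===== CLAIM (what is proved, stated in full; the proofs are below) =====
def Claim_equal_has_unbalanced_double_quote_py : Prop := ∀ (line : String), Dom_has_unbalanced_double_quote_py line → Spec_has_unbalanced_double_quote_py line (has_unbalanced_double_quote_py line)

-- ===== LEMMAS AND PROOFS =====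

-- A's loop, started unescaped, adds to the accumulator exactly the number of
-- quotes that survive the strip, and ends unescaped-or-after-trailing-backslash.
theorem pv_fold_strip (l : List Char) : ∀ (q : Int),
    (l.foldl (fun (st : Int × Bool) (char : Char) =>
      if st.2 then (st.1, false)
      else if char = '\\' then (st.1, true)
      else if char = '"' then (st.1 + 1, st.2)
      else st) (q, false)).1 = q + ((pvStripEscaped l).count '"' : Int) := by
  induction l using pvStripEscaped.induct with
  | case1 => intro q; simp [pvStripEscaped]
  | case2 c rest ih =>
      intro q
      simpa [List.foldl, pvStripEscaped] using ih q
  | case3 c rest hne ih =>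
      intro q
      by_cases hb : c = '\\'
      · have hrest : rest = [] := by
          cases rest with
          | nil => rfl
          | cons h t => exact absurd rfl (hne h t hb)
        subst hb; subst hrest
        simp [pvStripEscaped, List.foldl]
      · have hs : pvStripEscaped (c :: rest) = c :: pvStripEscaped rest := by
          rw [pvStripEscaped.eq_def]
          split
          · simp_all
          · next h => cases h; exact absurd rfl hb
          · next h => cases h; rfl
        rw [hs]
        simp only [List.foldl]
        rw [if_neg (by simp), if_neg hb]
        by_cases hq : c = '"'
        · subst hq
          rw [if_pos rfl, ih]
          simp
          omega
        · rw [if_neg hq, ih]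
          simp [hq]

-- ===== VERDICT (by name: the statement is the Claim_ definition above) =====
theorem has_unbalanced_double_quote_py_spec : Claim_equal_has_unbalanced_double_quote_py := by
  intro line _
  unfold Spec_has_unbalanced_double_quote_py has_unbalanced_double_quote_py has_unbalanced_double_quote_py_alt
  simp only []
  rw [pv_fold_strip]
  simp only [zero_add]
  set n := (pvStripEscaped line.toList).count '"'
  have : (n : Int) % 2 = (n % 2 : Nat) := by push_cast; rfl
  rw [this]
  rcases Nat.mod_two_eq_zero_or_one n with h | h <;> simp [h]
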